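/-
  THE SEGMENTS OF `DGifGetImageHeader` (dgif_lib.c:361-424; 189 instructions at 108E00H; a PROTECTED frame: `Buf[3]`, base = RA − 120,
  64 bytes; contract: Gif/Spec/Desc.lean `DGifGetImageHeader.spec`; design/CONTRACTS.md entry 11; design/units/DGifGetImageHeader.tsv).

      unit  from      to (exits)                        what it walks
      P     108E00H   108E49H                           the prologue: six pushes, `sub rsp, 88`, `rbx = gif`, the frame's header words,
                                                        `rbp` = the shadow index, the two poison stores                    (15 instructions)
      1     108E49H   108ECDH | 108E78H                 `Private`, IS_READABLE (l.366; the arm l.368 is walked), DGifGetWord × 3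
                                                        (Left, Top, Width: l.372-374), the shared error exit 108EA5H       (28)
      2     108ECDH   108EF8H | 108E78H                 DGifGetWord (Height: l.375), `InternalRead(Buf, 1)` (l.378); the short read
                                                        (l.379-382, 108F8BH): `Error`, `GifFreeMapObject(Image.ColorMap)` — the argument
                                                        possibly NULL: F-1 —, the NULL store                               (26)
      3     108EF8H   108F4EH | 108FFEH | 108E78H       `BitsPerPixel`, `Interlace` (l.384-385); `if (Image.ColorMap)` free + NULL
                                                        (l.388-391); `if (Buf[0] & 0x80)`: `GifMakeMapObject(1 << BitsPerPixel, NULL)`,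
                                                        the store that ADOPTS the map (l.396), the NULL arm (l.398-400, 1090CEH), `i = 0`  (36)
      4     108FFEH   10902FH | 108F4EH | 108E78H       THE LOOP HEAD (l.404): `i < ColorCount`; `InternalRead(Buf, 3)` (l.406); the
                                                        short read (l.407-410, 1090E3H): free, `Error`, the NULL store      (24)
      5     10902FH   108FFEH                           the three checked byte stores of one colour (l.412-414), `i++`      (38)
      6     108F4EH   108E78H                           `PixelCount = Width * Height` (l.418-420), DGifSetupDecompress (l.423: a CALL, not
                                                        a tail call: the frame is protected), `r13d` = its result           (14)
      E     108E78H   ret                               the 8-byte store that clears the frame's shadow, `eax = r13d`, `add rsp, 88`, six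
                                                        pops, `ret`                                                        (10)
      COMPOSITION                                       `compose`, proved below: `ReachVia.trans` along the segments; the loop by strong
                                                        induction on the measure `ColorCount − i`

  NO CUT HAS A DANGLING POINTER: each of the three `GifFreeMapObject` calls (108F31H, 108FABH, 1090F3H) is followed INSIDE its segment
  by the store of NULL to `gif.Image.ColorMap`, so every assertion has the whole state invariant `GifOK Hc Fc R v.mem`.

  THE GHOSTS THAT CHANGE: `Hc` (the present heap) and `Fc` (the present forest) are parameters of every assertion besides the entry's
  `H`, `F`; `SameRegion H Hc` and `F.SameButIcm Fc` relate them (what the post needs). Up to 108EF8H nothing was allocated or freed: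
  the assertions there are stated for `H` and `F` themselves.
-/
import Gif.Spec.Desc
import Gif.LabelsAt
namespace Gif.Spec
open X86 X86.User Asan ProgX.Base ProgX.Base.Spec

namespace DGifGetImageHeader

/-- The active frames inside the body: the function's own protected frame (`base = RA − 120`), innermost. -/
abbrev framesIn (frames : List (Nat × FrameLayout)) (e : State) : List (Nat × FrameLayout) :=
  ((e.reg .rsp).toNat - 120, Gif.Frames.DGifGetImageHeader) :: frames

/-- **IN THE BODY of `DGifGetImageHeader`**, at the address `cut`, inside the call that was entered at the state `e` (return address
`ret`) with the function's precondition for the heap `H` and the forest `F`; `Hc` and `Fc` are the PRESENT heap and forest. The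
prologue is done: six registers saved (`r15 r14 r13 r12 rbp rbx` in push order), `rsp = RA − 136`, `rbx = gif`, `rbp` = the shadow
index of the frame (`(RA − 120) >> 3`); the frame's red zones are poisoned: the heap's invariant holds with the OWN frame pushed; the
state invariant holds for `Hc`, `Fc`; nothing was written but the function's stack, the frame's 8 shadow bytes and the contract's
windows; the reader did not go back. `r12 r13 r14 r15` are locals: what they hold is said by the assertion of each cut. -/
structure Body (cut : Word) (H : Heap) (rest : List Obj) (frames : List (Nat × FrameLayout)) (F : Forest) (R : Rd)
    (Hc : Heap) (Fc : Forest) (u₀ e : State) (ret : Word) (v : State) : Prop where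
  /-- the function was entered at `e` … -/
  entry : AtEntry (conv u₀) Gif.L.DGifGetImageHeader.entry (DGifGetImageHeader.spec H rest frames F R).frame ret e
  /-- … with its precondition: `Env H rest frames F R e` (of the ENTRY memory: `HeapPre`'s region and text clauses and `Ctx` are
  memory-independent and are taken from here) and `rdi = gif` -/
  pre : (DGifGetImageHeader.spec H rest frames F R).pre e
  rip : v.rip = cut
  /-- six pushes and `sub rsp, 88` below the return address -/
  rsp : v.reg .rsp = e.reg .rsp - 136
  /-- `mov rbx, rdi` (108E0EH): `gif` -/
  rbx : v.reg .rbx = e.reg .rdi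
  /-- `lea rbp, [rsp+0x10] ; shr rbp, 3` (108E11H, 108E31H): the shadow index of the frame; the epilogue's store uses it -/
  rbp : v.reg .rbp = (e.reg .rsp - 120) >>> 3
  /-- the saved registers, in push order -/
  slot_r15 : v.mem.readLE (e.reg .rsp - 8) 8 = (e.reg .r15).toNat
  slot_r14 : v.mem.readLE (e.reg .rsp - 16) 8 = (e.reg .r14).toNat
  slot_r13 : v.mem.readLE (e.reg .rsp - 24) 8 = (e.reg .r13).toNat
  slot_r12 : v.mem.readLE (e.reg .rsp - 32) 8 = (e.reg .r12).toNat
  slot_rbp : v.mem.readLE (e.reg .rsp - 40) 8 = (e.reg .rbp).toNat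
  slot_rbx : v.mem.readLE (e.reg .rsp - 48) 8 = (e.reg .rbx).toNat
  /-- the return address is still in its slot (`ret` at 108E94H pops it): no store of the body reaches `[RA, RA + 8)` — the stack
  windows end at `RA`, the heap's region and the shadow lie at or above 800000H, the cursor is a stack object of a caller's frame -/
  slot_ra : UInt64.ofNat (v.mem.readLE (e.reg .rsp) 8) = ret
  /-- the heap's invariant for the PRESENT heap, the own frame active, the clean stack ending at the present stack pointer -/
  inv : HeapInv Hc rest (framesIn frames e) ((e.reg .rsp).toNat - 136) v.mem
  /-- the present heap is at the place of the entry's (what `HeapPre` of a callee and `Back2.region` ask) -/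
  region : SameRegion H Hc
  /-- the present forest differs from the entry's in `icm` only (the post's clause) -/
  forest : F.SameButIcm Fc
  /-- THE STATE INVARIANT, whole: no pointer dangles at a cut -/
  ok : GifOK Hc Fc R v.mem
  /-- the reader did not go back (`Back2.rem`) -/
  rem : rem R v.mem ≤ rem R e.mem
  /-- nothing was written but: the function's stack (the contract's 448 bytes), the own frame's 8 shadow bytes, the contract's
  windows (the heap's region, its shadow, the cursor's `cur`) -/
  same : Mem.SameExcept
    [⟨(e.reg .rsp).toNat - 448, (e.reg .rsp).toNat⟩,
     shadowSpan ((e.reg .rsp).toNat - 120) ((e.reg .rsp).toNat - 56),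
     ⟨0x800000, 0x1000020⟩,
     ⟨R.cur, R.cur + 8⟩] e.mem v.mem
  code : (conv u₀).code.In v.mem
  abi : (conv u₀).inv v

/-- **AFTER THE PROLOGUE** (at 108E49H `lea rdi, [rdi+0x70]`): `Body` for the entry's heap and forest, and `rdi` still holds `gif`
(the first body instruction computes `&gif->Private` from it). -/
structure AfterPrologue (H : Heap) (rest : List Obj) (frames : List (Nat × FrameLayout)) (F : Forest) (R : Rd) (u₀ e : State)
    (ret : Word) (v : State) : Prop where
  body : Body Gif.L.DGifGetImageHeader.at_108e49 H rest frames F R H F u₀ e ret v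
  /-- the argument register is untouched by the prologue -/
  rdi : v.reg .rdi = e.reg .rdi

/-- **AT A CUT OF THE BODY BEHIND THE LOAD OF `Private`** (108E52H `mov r12, [rbx+0x70]`): `Body`, and `r12 = pv` (its last use is
108F6CH `lea rdi, [r12+0x38]`: `&Private->PixelCount`). `r13 r14 r15` are dead at these cuts. Used at
  108ECDH (before the fourth DGifGetWord; `Hc = H`, `Fc = F`),
  108EF8H (the flag byte is in `Buf[0]` = `[rsp+0x30]`: ANY byte — no clause on it; `Hc = H`, `Fc = F`),
  108F4EH (the block l.418-423; the joint of "no local map" and the loop's exit: `Fc.icm` is `none` or the new map, all colours read). -/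
structure Mid (cut : Word) (H : Heap) (rest : List Obj) (frames : List (Nat × FrameLayout)) (F : Forest) (R : Rd)
    (Hc : Heap) (Fc : Forest) (u₀ e : State) (ret : Word) (v : State) : Prop where
  body : Body cut H rest frames F R Hc Fc u₀ e ret v
  /-- `Private` (l.364), loaded once -/
  r12 : (v.reg .r12).toNat = F.pv

/-- **THE HEAD OF THE COLOUR LOOP** (l.404, at 108FFEH `mov r13, [rbx+0x40]`), THE LOOP INVARIANT with the measure `m`: the new map
is already adopted as `Fc.icm = some mp` (the store at 108FEBH; so `ok` says `gif.Image.ColorMap = mp.obj`, `ColorCount = mp.count ≤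
256`, `Colors = mp.colors`, and both objects are owned: `(mp.colors, 3 · mp.count)` is a DATA object of the forest, the three byte
stores of a round go into it), `r14 = i ≤ mp.count` (a zero-extended 32-bit counter), `mp.count − i = m`. -/
structure Head (m : Nat) (H : Heap) (rest : List Obj) (frames : List (Nat × FrameLayout)) (F : Forest) (R : Rd)
    (Hc : Heap) (Fc : Forest) (u₀ e : State) (ret : Word) (v : State) : Prop where
  mid : Mid Gif.L.DGifGetImageHeader.at_108ffe H rest frames F R Hc Fc u₀ e ret v
  /-- the map, the counter, the measure -/
  loop : ∃ mp : Map, Fc.icm = some mp ∧ (v.reg .r14).toNat ≤ mp.count ∧ mp.count - (v.reg .r14).toNat = m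

/-- **ONE COLOUR WAS READ** (at 10902FH `lea rdi, [rbx+0x40]`, behind `InternalRead(Buf, 3) = 3`): as `Head`, with `i < mp.count` (the
test at 10900EH): the indices `3·i`, `3·i + 1`, `3·i + 2` of the stores l.412-414 are below `3 · mp.count`. The three bytes are in
`Buf` = `[rsp+0x30, rsp+0x33)`: ANY bytes. -/
structure Colour (m : Nat) (H : Heap) (rest : List Obj) (frames : List (Nat × FrameLayout)) (F : Forest) (R : Rd)
    (Hc : Heap) (Fc : Forest) (u₀ e : State) (ret : Word) (v : State) : Prop where
  mid : Mid Gif.L.DGifGetImageHeader.at_10902f H rest frames F R Hc Fc u₀ e ret v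
  /-- the map, the counter (strictly below the count), the measure -/
  loop : ∃ mp : Map, Fc.icm = some mp ∧ (v.reg .r14).toNat < mp.count ∧ mp.count - (v.reg .r14).toNat = m

/-- **BEFORE THE EPILOGUE** (at 108E78H): `Body`, the result in `r13d` (the epilogue's `mov eax, r13d` zero-extends it), and the
contract's success clause stated of the present memory (the epilogue clears 8 shadow bytes and pops: neither changes what `LZOK`
reads). -/
structure Done (H : Heap) (rest : List Obj) (frames : List (Nat × FrameLayout)) (F : Forest) (R : Rd)
    (Hc : Heap) (Fc : Forest) (u₀ e : State) (ret : Word) (v : State) : Prop where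
  body : Body Gif.L.DGifGetImageHeader.at_108e78 H rest frames F R Hc Fc u₀ e ret v
  /-- GIF_OK or GIF_ERROR -/
  res : (v.reg .r13).toNat % 2 ^ 32 = 1 ∨ (v.reg .r13).toNat % 2 ^ 32 = 0
  /-- GIF_OK comes from DGifSetupDecompress only: the LZW field ranges hold -/
  lz : (v.reg .r13).toNat % 2 ^ 32 = 1 → LZOK v.mem F.pv

/-- **Segment P** (the prologue, 15 instructions, 108E00H … 108E49H): six pushes, `sub rsp, 88`, `mov rbx, rdi`, the frame's three
header words, the shadow index in `rbp`, the two poison stores (`HeapInv.prologue_ra`, `GifOK.storesMem`). -/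
def SegP (Lay : Layout) (μ : Microarch) (u₀ : State) : Prop :=
  ∀ (H : Heap) (rest : List Obj) (frames : List (Nat × FrameLayout)) (F : Forest) (R : Rd) (e : State) (ret : Word),
    AtEntry (conv u₀) Gif.L.DGifGetImageHeader.entry (DGifGetImageHeader.spec H rest frames F R).frame ret e →
    (DGifGetImageHeader.spec H rest frames F R).pre e →
    ReachVia Lay μ WayInv e (AfterPrologue H rest frames F R u₀ e ret)

/-- **Segment 1** (28 instructions; 108E49H … 108E78H, 108E95H … 108ECDH): `r12 = gif->Private` (checked load), IS_READABLE (checked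
load of `FileState`, `and 8`; not readable — excluded by `Shape.state`, or walked —: the checked store of `Error`, `r13d = 0`);
`DGifGetWord(gif, &gif->Image.Left)`, `… .Top`, `… .Width` (`Word` = `gif + 40, 44, 48`: inside `[gif + 40, gif + 64)`); a word fails:
`r13d = 0` (108EA5H) and to the epilogue with the entry's heap and forest. -/
def Seg1 (Lay : Layout) (μ : Microarch) (u₀ : State) : Prop :=
  ∀ (H : Heap) (rest : List Obj) (frames : List (Nat × FrameLayout)) (F : Forest) (R : Rd) (e : State) (ret : Word) (v : State),
    AfterPrologue H rest frames F R u₀ e ret v →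
    ReachVia Lay μ WayInv v (fun w =>
      Mid Gif.L.DGifGetImageHeader.at_108ecd H rest frames F R H F u₀ e ret w ∨
      Done H rest frames F R H F u₀ e ret w)

/-- **Segment 2** (26 instructions; 108ECDH … 108EF8H, the error exit 108EA5H … 108EADH, 108F8BH … 108FCBH):
`DGifGetWord(gif, &gif->Image.Height)` (`gif + 52`); `InternalRead(gif, Buf, 1)` into the frame's object `Buf` (`rsp + 0x30` = RA − 88:
`BufOK` by `Loose.stack`). One byte: to 108EF8H. A short read (l.379-382): the checked store of `Error`, the checked load of
`gif.Image.ColorMap`, `GifFreeMapObject` of it — NULL (`Fc.icm = none`: the heap and the forest are the entry's) or the map (both its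
objects freed: `(H.release colors).release obj`, `icm := none`) —, the checked store of NULL INSIDE the segment, `r13d = 0`. -/
def Seg2 (Lay : Layout) (μ : Microarch) (u₀ : State) : Prop :=
  ∀ (H : Heap) (rest : List Obj) (frames : List (Nat × FrameLayout)) (F : Forest) (R : Rd) (e : State) (ret : Word) (v : State),
    Mid Gif.L.DGifGetImageHeader.at_108ecd H rest frames F R H F u₀ e ret v →
    ReachVia Lay μ WayInv v (fun w =>
      Mid Gif.L.DGifGetImageHeader.at_108ef8 H rest frames F R H F u₀ e ret w ∨
      ∃ (H' : Heap) (F' : Forest), Done H rest frames F R H' F' u₀ e ret w)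

/-- **Segment 3** (36 instructions; 108EF8H … 108F4EH, 108FCBH … 108FFEH, 1090CEH … 1090E3H): `r13d = (Buf[0] & 7) + 1` (1 … 8), the
checked byte store of `Interlace` (`gif + 56`: a scalar field); `if (Image.ColorMap)`: `GifFreeMapObject` and the checked store of
NULL (`icm := none`); `Buf[0] & 0x80` clear: to 108F4EH. Set: `GifMakeMapObject(1 << r13d, NULL)` (2 … 256 colours), the checked
store of the result to `gif.Image.ColorMap` — NULL: `Error`, `r13d = 0` (= the low half of the NULL result), to the epilogue;
otherwise THE MAP IS ADOPTED (`Owns.cons_grew` twice, `Shape.set_icm` with `MapAt.intro`) — and `r14d = 0`: the loop head with the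
measure `m = count`. -/
def Seg3 (Lay : Layout) (μ : Microarch) (u₀ : State) : Prop :=
  ∀ (H : Heap) (rest : List Obj) (frames : List (Nat × FrameLayout)) (F : Forest) (R : Rd) (e : State) (ret : Word) (v : State),
    Mid Gif.L.DGifGetImageHeader.at_108ef8 H rest frames F R H F u₀ e ret v →
    ReachVia Lay μ WayInv v (fun w =>
      (∃ (H' : Heap) (F' : Forest), Mid Gif.L.DGifGetImageHeader.at_108f4e H rest frames F R H' F' u₀ e ret w) ∨
      (∃ (H' : Heap) (F' : Forest) (m : Nat), Head m H rest frames F R H' F' u₀ e ret w) ∨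
      (∃ (H' : Heap) (F' : Forest), Done H rest frames F R H' F' u₀ e ret w))

/-- **Segment 4** (24 instructions; 108FFEH … 10902FH, 1090E3H … 109123H): THE LOOP TEST `i < gif.Image.ColorMap->ColorCount` (a
checked load of the map object; `jae`: unsigned) — false: to 108F4EH with the same heap and forest —; `InternalRead(gif, Buf, 3)`;
three bytes: to 10902FH with the same measure. A short read (l.407-410): the checked load of `gif.Image.ColorMap`, `GifFreeMapObject`
(both objects of `mp` freed: `(Hc.release mp.colors).release mp.obj`), `Error`, the checked store of NULL INSIDE the segment
(`icm := none`), `r13d = 0`. -/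
def Seg4 (Lay : Layout) (μ : Microarch) (u₀ : State) : Prop :=
  ∀ (H : Heap) (rest : List Obj) (frames : List (Nat × FrameLayout)) (F : Forest) (R : Rd) (e : State) (ret : Word) (m : Nat)
    (Hc : Heap) (Fc : Forest) (v : State),
    Head m H rest frames F R Hc Fc u₀ e ret v →
    ReachVia Lay μ WayInv v (fun w =>
      Colour m H rest frames F R Hc Fc u₀ e ret w ∨
      Mid Gif.L.DGifGetImageHeader.at_108f4e H rest frames F R Hc Fc u₀ e ret w ∨
      ∃ (H' : Heap) (F' : Forest), Done H rest frames F R H' F' u₀ e ret w)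

/-- **Segment 5** (38 instructions; 10902FH … 1090CEH): `Colors[i].Red = Buf[0]`, `.Green = Buf[1]`, `.Blue = Buf[2]`: for each, the
checked loads of `gif.Image.ColorMap` and of its `Colors` field, the address `mp.colors + 3·i + k`, the byte through the spill slot
`[rsp+0xf]`, the checked byte store into the DATA object `(mp.colors, 3 · mp.count)` (`Loose.data`: the shape is kept); `i++`; back
to the head with a smaller measure. The heap and the forest do not change. -/
def Seg5 (Lay : Layout) (μ : Microarch) (u₀ : State) : Prop :=
  ∀ (H : Heap) (rest : List Obj) (frames : List (Nat × FrameLayout)) (F : Forest) (R : Rd) (e : State) (ret : Word) (m : Nat)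
    (Hc : Heap) (Fc : Forest) (v : State),
    Colour m H rest frames F R Hc Fc u₀ e ret v →
    ReachVia Lay μ WayInv v (fun w => ∃ m', m' < m ∧ Head m' H rest frames F R Hc Fc u₀ e ret w)

/-- **Segment 6** (14 instructions; 108F4EH … 108F8BH): the checked loads of `gif.Image.Width`, `.Height`, their 64-bit product, the
checked store of `Private->PixelCount` (`pv + 56`: the body of pv, loose); `DGifSetupDecompress(gif)` — a CALL (108F7EH), its
contract for `Hc`, `Fc`: `Back`, and on GIF_OK `LZOK` —; `r13d = eax`; to the epilogue. The heap and the forest do not change. -/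
def Seg6 (Lay : Layout) (μ : Microarch) (u₀ : State) : Prop :=
  ∀ (H : Heap) (rest : List Obj) (frames : List (Nat × FrameLayout)) (F : Forest) (R : Rd) (e : State) (ret : Word)
    (Hc : Heap) (Fc : Forest) (v : State),
    Mid Gif.L.DGifGetImageHeader.at_108f4e H rest frames F R Hc Fc u₀ e ret v →
    ReachVia Lay μ WayInv v (Done H rest frames F R Hc Fc u₀ e ret)

/-- **Segment E** (the epilogue, 10 instructions; 108E78H … 108E95H): the 8-byte store that clears the frame's shadow
(`HeapInv.epilogue_ra`), `mov eax, r13d`, `add rsp, 88`, six pops, `ret`: the contract's `Returned`, with `H' = Hc`, `F' = Fc`. -/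
def SegE (Lay : Layout) (μ : Microarch) (u₀ : State) : Prop :=
  ∀ (H : Heap) (rest : List Obj) (frames : List (Nat × FrameLayout)) (F : Forest) (R : Rd) (e : State) (ret : Word)
    (Hc : Heap) (Fc : Forest) (v : State),
    Done H rest frames F R Hc Fc u₀ e ret v →
    ReachVia Lay μ WayInv v (Returned (conv u₀) (DGifGetImageHeader.spec H rest frames F R) e ret)

/-- From a `Done` state for some heap and forest: the epilogue. -/
theorem fromDone {Lay : Layout} {μ : Microarch} {u₀ : State} (hE : SegE Lay μ u₀)
    (H : Heap) (rest : List Obj) (frames : List (Nat × FrameLayout)) (F : Forest) (R : Rd) (e : State) (ret : Word) (w : State)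
    (hw : ∃ (H' : Heap) (F' : Forest), Done H rest frames F R H' F' u₀ e ret w) :
    ReachVia Lay μ WayInv w (Returned (conv u₀) (DGifGetImageHeader.spec H rest frames F R) e ret) := by
  obtain ⟨H', F', hd⟩ := hw
  exact hE H rest frames F R e ret H' F' w hd

/-- From the block l.418-423 (108F4EH): segment 6, then the epilogue. -/
theorem fromPixels {Lay : Layout} {μ : Microarch} {u₀ : State} (h6 : Seg6 Lay μ u₀) (hE : SegE Lay μ u₀)
    (H : Heap) (rest : List Obj) (frames : List (Nat × FrameLayout)) (F : Forest) (R : Rd) (e : State) (ret : Word)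
    (Hc : Heap) (Fc : Forest) (w : State)
    (hw : Mid Gif.L.DGifGetImageHeader.at_108f4e H rest frames F R Hc Fc u₀ e ret w) :
    ReachVia Lay μ WayInv w (Returned (conv u₀) (DGifGetImageHeader.spec H rest frames F R) e ret) := by
  refine (h6 H rest frames F R e ret Hc Fc w hw).trans ?_
  intro x hx
  exact hE H rest frames F R e ret Hc Fc x hx

/-- **THE COLOUR LOOP**, from its head with the measure `m`: by strong induction on `m`. A round is segment 4 (to the exit, to the
error return, or on to 10902FH) and segment 5 (back to the head, the measure smaller). -/
theorem fromHead {Lay : Layout} {μ : Microarch} {u₀ : State} (h4 : Seg4 Lay μ u₀) (h5 : Seg5 Lay μ u₀) (h6 : Seg6 Lay μ u₀)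
    (hE : SegE Lay μ u₀)
    (H : Heap) (rest : List Obj) (frames : List (Nat × FrameLayout)) (F : Forest) (R : Rd) (e : State) (ret : Word) :
    ∀ (m : Nat) (Hc : Heap) (Fc : Forest) (v : State),
      Head m H rest frames F R Hc Fc u₀ e ret v →
      ReachVia Lay μ WayInv v (Returned (conv u₀) (DGifGetImageHeader.spec H rest frames F R) e ret) := by
  intro m
  induction m using Nat.strongRecOn with
  | _ m ih =>
    intro Hc Fc v hv
    refine (h4 H rest frames F R e ret m Hc Fc v hv).trans ?_
    intro w hw
    rcases hw with hc | hp | hd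
    · refine (h5 H rest frames F R e ret m Hc Fc w hc).trans ?_
      intro x hx
      obtain ⟨m', hlt, hh⟩ := hx
      exact ih m' hlt Hc Fc x hh
    · exact fromPixels h6 hE H rest frames F R e ret Hc Fc w hp
    · exact fromDone hE H rest frames F R e ret w hd

/-- **The composition of `DGifGetImageHeader`**: the eight segments chain into the function's contract. -/
theorem compose {Lay : Layout} {μ : Microarch} {u₀ : State} (hP : SegP Lay μ u₀) (h1 : Seg1 Lay μ u₀) (h2 : Seg2 Lay μ u₀)
    (h3 : Seg3 Lay μ u₀) (h4 : Seg4 Lay μ u₀) (h5 : Seg5 Lay μ u₀) (h6 : Seg6 Lay μ u₀) (hE : SegE Lay μ u₀) :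
    ∀ (H : Heap) (rest : List Obj) (frames : List (Nat × FrameLayout)) (F : Forest) (R : Rd),
      Calls Lay μ WayInv (conv u₀) Gif.L.DGifGetImageHeader.entry (DGifGetImageHeader.spec H rest frames F R) := by
  intro H rest frames F R e ret he hp
  refine (hP H rest frames F R e ret he hp).trans ?_
  intro v1 hv1
  refine (h1 H rest frames F R e ret v1 hv1).trans ?_
  intro v2 hv2
  rcases hv2 with hmid2 | hdone2
  · refine (h2 H rest frames F R e ret v2 hmid2).trans ?_
    intro v3 hv3
    rcases hv3 with hmid3 | hdone3
    · refine (h3 H rest frames F R e ret v3 hmid3).trans ?_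
      intro v4 hv4
      rcases hv4 with hpix | hhead | hdone4
      · obtain ⟨H', F', hp'⟩ := hpix
        exact fromPixels h6 hE H rest frames F R e ret H' F' v4 hp'
      · obtain ⟨H', F', m, hh⟩ := hhead
        exact fromHead h4 h5 h6 hE H rest frames F R e ret m H' F' v4 hh
      · exact fromDone hE H rest frames F R e ret v4 hdone4
    · exact fromDone hE H rest frames F R e ret v3 hdone3
  · exact hE H rest frames F R e ret H F v2 hdone2

end DGifGetImageHeader

end Gif.Spec
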